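-- pv_equiv track=rewrite | github.com/tahiri-lab/overlap-tree-data-pipeline | make_base_species_lists_phylo_stratified.py | allocate_across_strata_equal
-- ===== SOURCE A (Python) =====
-- from typing import Dict, List, Tuple
--
-- def allocate_across_strata_equal(
--     size: int, k: int, strata_sizes: List[int], ensure_min1: bool = True
-- ) -> List[int]:
--     """
--     Allocate 'size' picks across k strata:
--     - roughly equal
--     - optionally ensure >=1 per stratum if size>=k
--     - remainder goes first to larger strata
--     """
--     if k <= 0:
--         return []
--
--     if ensure_min1 and size >= k:
--         alloc = [1] * k
--         remaining = size - k
--     else: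
--         alloc = [0] * k
--         remaining = size
--
--     if remaining <= 0:
--         return alloc
--
--     base = remaining // k
--     rem = remaining % k
--     alloc = [a + base for a in alloc]
--
--     order = sorted(range(k), key=lambda i: strata_sizes[i], reverse=True)
--     for i in order[:rem]:
--         alloc[i] += 1
--     return alloc
-- ===== SOURCE B (Python) =====
-- def _kth_largest(vals, m):
--     # value at 0-based position m of vals sorted in descending order,
--     # found by three-way-partition quickselect (middle-element pivot)
--     while True:
--         p = vals[len(vals) // 2]
--         gt = [v for v in vals if v > p]
--         if m < len(gt):
--             vals = gt
--             continue
--         eq = sum(1 for v in vals if v == p)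
--         if m < len(gt) + eq:
--             return p
--         m -= len(gt) + eq
--         vals = [v for v in vals if v < p]
--
--
-- def allocate_across_strata_equal(size, k, strata_sizes, ensure_min1=True):
--     if k <= 0:
--         return []
--     min1 = ensure_min1 and size >= k
--     remaining = size - k if min1 else size
--     start = 1 if min1 else 0
--     if remaining <= 0:
--         return [start] * k
--     base = start + remaining // k
--     rem = remaining % k
--     if rem == 0:
--         return [base] * k
--     vals = [strata_sizes[i] for i in range(k)]
--     t = _kth_largest(vals, rem - 1)
--     ties = rem - sum(1 for v in vals if v > t)
--     out = []
--     for v in vals: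
--         if v > t:
--             out.append(base + 1)
--         elif v == t and ties > 0:
--             out.append(base + 1)
--             ties -= 1
--         else:
--             out.append(base)
--     return out
-- ===== Notes on version B (the rewrite author's own statement) =====
-- stated objective: faster
-- what changed: Instead of stably sorting all k indices by stratum size and scattering +1 increments over the first rem of them, B finds the rem-th largest size by three-way quickselect (expected O(k)) and does one stable left-to-right scan handing the remainder to sizes above the threshold and to the first remaining ties.
import Mathlib
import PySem

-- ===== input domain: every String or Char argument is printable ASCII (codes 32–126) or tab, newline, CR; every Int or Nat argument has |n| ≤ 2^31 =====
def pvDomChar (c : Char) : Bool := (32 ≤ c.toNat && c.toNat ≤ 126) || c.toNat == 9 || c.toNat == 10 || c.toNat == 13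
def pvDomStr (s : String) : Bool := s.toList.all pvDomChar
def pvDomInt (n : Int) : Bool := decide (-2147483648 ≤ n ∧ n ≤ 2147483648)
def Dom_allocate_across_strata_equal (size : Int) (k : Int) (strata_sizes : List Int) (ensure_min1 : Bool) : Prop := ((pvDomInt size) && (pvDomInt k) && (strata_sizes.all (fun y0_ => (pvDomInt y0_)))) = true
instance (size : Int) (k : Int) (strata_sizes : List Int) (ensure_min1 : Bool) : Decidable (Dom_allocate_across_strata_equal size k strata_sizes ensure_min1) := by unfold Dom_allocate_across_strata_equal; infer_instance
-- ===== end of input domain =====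

-- B replaces A's full stable index sort + scattered increments by a quickselect threshold and one
-- stable left-to-right scan (objective: faster — expected O(k) vs O(k log k), measured faster by the
-- timing run at the largest size).

-- ===== PORT A =====
def allocate_across_strata_equal (size : Int) (k : Int) (strata_sizes : List Int) (ensure_min1 : Bool) : List Int :=
  if k ≤ 0 then []
  else
    -- alloc = [1]*k / [0]*k ; remaining
    let p := if ensure_min1 && decide (size ≥ k) then (List.replicate k.toNat (1 : Int), size - k)
             else (List.replicate k.toNat (0 : Int), size)
    if p.2 ≤ 0 then p.1
    else
      let base := PySem.Int.floordiv p.2 k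
      let rem := PySem.Int.mod p.2 k
      let alloc := p.1.map (fun a => a + base)
      -- sorted(range(k), key=lambda i: strata_sizes[i], reverse=True); the key is total here via a
      -- default (Python raises IndexError out of range — those inputs are excluded by Pre_)
      let order := PySem.List.sorted (PySem.List.pyRange 0 k)
                     (fun i => PySem.List.pyGetD strata_sizes i 0) true
      -- for i in order[:rem]: alloc[i] += 1
      (PySem.List.slice order none (some rem)).foldl
        (fun ac i => PySem.List.pySetD ac i (PySem.List.pyGetD ac i 0 + 1)) alloc

-- ===== PORT B =====
-- _kth_largest: three-way-partition quickselect (middle-element pivot); the Python loop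
-- 'while True: …' with rebound vals/m is this recursion; vals[len(vals)//2] is exact via the
-- in-range index (the empty-list guard returns a junk value where Python would raise — unreachable
-- from allocate_across_strata_equal_alt, which always passes 0 ≤ m < len(vals)).
-- termination helper for kth_largest: filtering out the pivot shrinks the list
theorem pv_filter_piv_lt (vals : List Int) (h : ¬ vals.length = 0)
    (f : {x // x ∈ vals} → Bool)
    (hq : ∀ hm : vals.getD (vals.length / 2) 0 ∈ vals, f ⟨vals.getD (vals.length / 2) 0, hm⟩ = false) :
    (List.filter f vals.attach).unattach.length < vals.length := by
  have hlt : vals.length / 2 < vals.length := Nat.div_lt_self (Nat.pos_of_ne_zero h) (by omega)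
  have hmem : vals.getD (vals.length / 2) 0 ∈ vals := by
    rw [List.getD_eq_getElem _ _ hlt]; exact List.getElem_mem _
  have hx : (List.filter f vals.attach).length < vals.attach.length :=
    List.length_filter_lt_length_iff_exists.mpr ⟨⟨_, hmem⟩, List.mem_attach _ _, by simp only [hq hmem]; exact Bool.false_ne_true⟩
  simpa using hx

def kth_largest (vals : List Int) (m : Int) : Int :=
  if hv : vals.length = 0 then 0
  else
    -- p = vals[len(vals)//2]; gt = [v for v in vals if v > p]; eq = sum(1 for v in vals if v == p)
    if m < ((vals.filter (fun v => decide (vals.getD (vals.length / 2) 0 < v))).length : Int) then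
      kth_largest (vals.filter (fun v => decide (vals.getD (vals.length / 2) 0 < v))) m
    else if m < ((vals.filter (fun v => decide (vals.getD (vals.length / 2) 0 < v))).length : Int)
               + (vals.countP (fun v => decide (v = vals.getD (vals.length / 2) 0)) : Int) then
      vals.getD (vals.length / 2) 0
    else
      kth_largest (vals.filter (fun v => decide (v < vals.getD (vals.length / 2) 0)))
        (m - ((vals.filter (fun v => decide (vals.getD (vals.length / 2) 0 < v))).length : Int)
           - (vals.countP (fun v => decide (v = vals.getD (vals.length / 2) 0)) : Int))
termination_by vals.length
decreasing_by
  · apply pv_filter_piv_lt vals hv; intro hm; simp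
  · apply pv_filter_piv_lt vals hv; intro hm; simp

-- the 'for v in vals: … out.append(…)' loop of B, with the running 'ties' counter
def bScan (t base : Int) : List Int → Int → List Int
  | [], _ => []
  | v :: vs, ties =>
    if t < v then (base + 1) :: bScan t base vs ties
    else if v = t ∧ 0 < ties then (base + 1) :: bScan t base vs (ties - 1)
    else base :: bScan t base vs ties

def allocate_across_strata_equal_alt (size : Int) (k : Int) (strata_sizes : List Int) (ensure_min1 : Bool) : List Int :=
  if k ≤ 0 then []
  else
    let min1 := ensure_min1 && decide (size ≥ k)
    let remaining := if min1 then size - k else size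
    let start : Int := if min1 then 1 else 0
    if remaining ≤ 0 then List.replicate k.toNat start
    else
      let base := start + PySem.Int.floordiv remaining k
      let rem := PySem.Int.mod remaining k
      if rem = 0 then List.replicate k.toNat base
      else
        let vals := (PySem.List.pyRange 0 k).map (fun i => PySem.List.pyGetD strata_sizes i 0)
        let t := kth_largest vals (rem - 1)
        let ties := rem - (vals.countP (fun v => decide (t < v)) : Int)
        bScan t base vals ties

-- ===== PRECONDITION & SPEC =====
-- Pre_ excludes exactly the inputs where A raises IndexError: k > 0, picks left to distribute,
-- and fewer than k strata sizes (the sort key indexes strata_sizes[i] for every i < k).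
def Pre_allocate_across_strata_equal (size : Int) (k : Int) (strata_sizes : List Int) (ensure_min1 : Bool) : Prop :=
  k ≤ 0 ∨ (if ensure_min1 && decide (size ≥ k) then size - k else size) ≤ 0 ∨ k ≤ (strata_sizes.length : Int)
instance (size : Int) (k : Int) (strata_sizes : List Int) (ensure_min1 : Bool) : Decidable (Pre_allocate_across_strata_equal size k strata_sizes ensure_min1) := by unfold Pre_allocate_across_strata_equal; infer_instance
def pvWitness_allocate_across_strata_equal : Int × Int × List Int × Bool := (7, 3, [5, 2, 5], true)

def Spec_allocate_across_strata_equal (size : Int) (k : Int) (strata_sizes : List Int) (ensure_min1 : Bool) (out : List Int) : Prop := out = allocate_across_strata_equal_alt size k strata_sizes ensure_min1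
instance (size : Int) (k : Int) (strata_sizes : List Int) (ensure_min1 : Bool) (out : List Int) : Decidable (Spec_allocate_across_strata_equal size k strata_sizes ensure_min1 out) := by unfold Spec_allocate_across_strata_equal; infer_instance

-- ===== CLAIM (what is proved, stated in full; the proofs are below) =====
def Claim_equal_allocate_across_strata_equal : Prop := ∀ (size : Int) (k : Int) (strata_sizes : List Int) (ensure_min1 : Bool), Dom_allocate_across_strata_equal size k strata_sizes ensure_min1 → Pre_allocate_across_strata_equal size k strata_sizes ensure_min1 → Spec_allocate_across_strata_equal size k strata_sizes ensure_min1 (allocate_across_strata_equal size k strata_sizes ensure_min1)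

-- ===== LEMMAS AND PROOFS =====

-- the stable order A's reverse sort produces on a strictly increasing list of indices:
-- larger key first, ties by smaller index first
abbrev pvR (key : Int → Int) (a b : Int) : Prop := key b < key a ∨ (key a = key b ∧ a < b)

theorem pv_insertBy_pairwise (key : Int → Int) (x : Int) (acc : List Int)
    (hacc : acc.Pairwise (pvR key)) (hlt : ∀ y ∈ acc, y < x) :
    (PySem.List.insertBy (fun a b => decide (key b < key a)) x acc).Pairwise (pvR key) := by
  induction acc with
  | nil => simp [PySem.List.insertBy]
  | cons y ys ih =>
    rcases List.pairwise_cons.mp hacc with ⟨hy, hys⟩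
    by_cases hb : key y < key x
    · simp only [PySem.List.insertBy, hb, decide_true, if_true]
      refine List.pairwise_cons.mpr ⟨?_, hacc⟩
      intro z hz
      rcases List.mem_cons.mp hz with rfl | hz'
      · exact Or.inl hb
      · rcases hy z hz' with h1 | ⟨h1, _⟩
        · exact Or.inl (h1.trans hb)
        · exact Or.inl (h1 ▸ hb)
    · simp only [PySem.List.insertBy, hb, decide_false, if_false]
      refine List.pairwise_cons.mpr ⟨?_, ih hys (fun z hz => hlt z (List.mem_cons_of_mem _ hz))⟩
      intro z hz
      rcases (PySem.List.mem_insertBy _ _ _ _).mp hz with rfl | hz'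
      · rcases lt_or_eq_of_le (not_lt.mp hb) with h1 | h1
        · exact Or.inl h1
        · exact Or.inr ⟨h1.symm, hlt y (List.mem_cons_self)⟩
      · exact hy z hz'

theorem pv_foldl_insertBy_pairwise (key : Int → Int) :
    ∀ (xs acc : List Int), acc.Pairwise (pvR key) → (∀ x ∈ xs, ∀ y ∈ acc, y < x) →
      xs.Pairwise (· < ·) →
      (List.foldl (fun acc x => PySem.List.insertBy (fun a b => decide (key b < key a)) x acc) acc xs).Pairwise (pvR key) := by
  intro xs
  induction xs with
  | nil => intro acc hacc _ _; simpa using hacc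
  | cons x xs ih =>
    intro acc hacc hlt hxs
    rcases List.pairwise_cons.mp hxs with ⟨hx, hxs'⟩
    simp only [List.foldl_cons]
    refine ih _ (pv_insertBy_pairwise key x acc hacc (hlt x List.mem_cons_self)) ?_ hxs'
    intro z hz y hy
    rcases (PySem.List.mem_insertBy _ _ _ _).mp hy with rfl | hy'
    · exact hx z hz
    · exact hlt z (List.mem_cons_of_mem _ hz) y hy'

theorem pv_sorted_stable_pairwise (key : Int → Int) (xs : List Int) (hxs : xs.Pairwise (· < ·)) :
    (PySem.List.sorted xs key true).Pairwise (pvR key) := by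
  rw [PySem.List.sorted_rev_eq_foldl_insertBy]
  exact pv_foldl_insertBy_pairwise key xs [] (by simp) (by simp) hxs

-- position in a pairwise-ordered list = number of elements that come before
theorem pv_mem_take_iff (key : Int → Int) :
    ∀ (ys : List Int) (m : Nat) (i : Int), ys.Pairwise (pvR key) → i ∈ ys →
      (i ∈ ys.take m ↔ ys.countP (fun j => decide (pvR key j i)) < m) := by
  intro ys
  induction ys with
  | nil => simp
  | cons a t ih =>
    intro m i hp hi
    rcases List.pairwise_cons.mp hp with ⟨ha, ht⟩
    have hRirr : ∀ b, ¬ pvR key b b := by intro b; unfold pvR; omega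
    have hasym : ∀ b c, pvR key b c → ¬ pvR key c b := by intro b c; unfold pvR; omega
    by_cases hia : i = a
    · subst hia
      have hcnt : List.countP (fun j => decide (pvR key j i)) (i :: t) = 0 := by
        rw [List.countP_eq_zero]
        intro j hj
        rcases List.mem_cons.mp hj with rfl | hj'
        · simpa using hRirr j
        · simpa using hasym i j (ha j hj')
      rw [hcnt]
      cases m with
      | zero => simp
      | succ m' => simp
    · have hit : i ∈ t := (List.mem_cons.mp hi).resolve_left hia
      have hcnt : List.countP (fun j => decide (pvR key j i)) (a :: t)
          = List.countP (fun j => decide (pvR key j i)) t + 1 := by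
        rw [List.countP_cons]
        simp [ha i hit]
      rw [hcnt]
      cases m with
      | zero => simp
      | succ m' =>
        rw [List.take_succ_cons]
        constructor
        · intro hmem
          rcases List.mem_cons.mp hmem with rfl | hmem'
          · exact absurd rfl hia
          · have := (ih m' i ht hit).mp hmem'
            omega
        · intro hlt
          exact List.mem_cons_of_mem _ ((ih m' i ht hit).mpr (by omega))

-- the A-side increment loop: each visited (distinct, in-range) index gains exactly 1
theorem pv_foldl_incr :
    ∀ (S al : List Int), S.Nodup → (∀ i ∈ S, 0 ≤ i ∧ i < (al.length : Int)) →
      S.foldl (fun ac i => PySem.List.pySetD ac i (PySem.List.pyGetD ac i 0 + 1)) al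
        = (List.range al.length).map (fun j => al.getD j 0 + if ((j : Int) ∈ S) then 1 else 0) := by
  intro S
  induction S with
  | nil =>
    intro al _ _
    simp only [List.foldl_nil, List.not_mem_nil, if_false, add_zero]
    apply List.ext_getElem (by simp)
    intro j h1 h2
    simp [List.getD_eq_getElem?_getD, List.getElem?_eq_getElem (by simpa using h2)]
  | cons i S ih =>
    intro al hnd hb
    rcases List.nodup_cons.mp hnd with ⟨hiS, hndS⟩
    rcases hb i List.mem_cons_self with ⟨hi0, hik⟩
    have hset : PySem.List.pySetD al i (PySem.List.pyGetD al i 0 + 1)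
        = al.set i.toNat (al.getD i.toNat 0 + 1) := by
      rw [PySem.List.pySetD_of_nonneg al _ hi0,
        PySem.List.pyGetD_eq_getElem al 0 hi0 hik,
        List.getD_eq_getElem?_getD, List.getElem?_eq_getElem (by omega)]
      simp
    simp only [List.foldl_cons, hset]
    rw [ih _ hndS (by simpa [List.length_set] using fun j hj => hb j (List.mem_cons_of_mem _ hj))]
    apply List.ext_getElem (by simp)
    intro j h1 h2
    have hjlen : j < al.length := by simpa using h1
    have hgetset : (al.set i.toNat (al.getD i.toNat 0 + 1)).getD j 0
        = al.getD j 0 + if j = i.toNat then 1 else 0 := by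
      by_cases hj : j = i.toNat
      · subst hj
        rw [List.getD_eq_getElem?_getD, List.getElem?_set_self (by omega)]
        simp [List.getD_eq_getElem?_getD, List.getElem?_eq_getElem hjlen]
      · rw [List.getD_eq_getElem?_getD, List.getElem?_set_ne (by omega)]
        simp [List.getD_eq_getElem?_getD, hj]
    have hmem : ((j : Int) ∈ i :: S) ↔ (j = i.toNat ∨ (j : Int) ∈ S) := by
      constructor
      · intro h; rcases List.mem_cons.mp h with h | h
        · exact Or.inl (by omega)
        · exact Or.inr h
      · intro h; rcases h with h | h
        · exact List.mem_cons.mpr (Or.inl (by omega))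
        · exact List.mem_cons_of_mem _ h
    simp only [List.getElem_map, List.getElem_range, List.length_set]
    rw [hgetset]; simp only [propext hmem]
    generalize al.getD j 0 = g
    by_cases hj : j = i.toNat
    · have hns : ((j : Int) ∉ S) := by rw [show (j : Int) = i by omega]; exact hiS
      rw [if_pos hj, if_neg hns, if_pos (Or.inl hj)]; omega
    · by_cases hjS : (j : Int) ∈ S
      · rw [if_neg hj, if_pos hjS, if_pos (Or.inr hjS)]; omega
      · rw [if_neg hj, if_neg hjS, if_neg (by tauto)]; omega

-- plain-filter version of the termination fact: dropping the pivot shrinks the list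
theorem pv_filter_lt_of_piv (vals : List Int) (hne : ¬ vals.length = 0) (q : Int → Bool)
    (hq : q (vals.getD (vals.length / 2) 0) = false) : (vals.filter q).length < vals.length := by
  have hlt : vals.length / 2 < vals.length := Nat.div_lt_self (Nat.pos_of_ne_zero hne) (by omega)
  refine List.length_filter_lt_length_iff_exists.mpr ⟨vals.getD (vals.length / 2) 0, ?_, by simp only [hq]; exact Bool.false_ne_true⟩
  rw [List.getD_eq_getElem _ _ hlt]
  exact List.getElem_mem _

-- three-way split of a count along the quickselect partition
theorem pv_countP_tri (p : Int) (q : Int → Bool) (l : List Int) :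
    l.countP q = ((l.filter (fun v => decide (p < v))).countP q)
      + ((l.filter (fun v => decide (v = p))).countP q)
      + ((l.filter (fun v => decide (v < p))).countP q) := by
  induction l with
  | nil => simp
  | cons a l ih =>
    rcases lt_trichotomy p a with h | h | h
    · rw [List.filter_cons_of_pos (by simpa using h),
        List.filter_cons_of_neg (by simp; omega),
        List.filter_cons_of_neg (by simp; omega)]
      simp only [List.countP_cons, ih]
      by_cases hq : q a = true <;> simp [hq] <;> omega
    · rw [List.filter_cons_of_neg (by simp; omega),
        List.filter_cons_of_pos (by simp; omega),
        List.filter_cons_of_neg (by simp; omega)]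
      simp only [List.countP_cons, ih]
      by_cases hq : q a = true <;> simp [hq] <;> omega
    · rw [List.filter_cons_of_neg (by simp; omega),
        List.filter_cons_of_neg (by simp; omega),
        List.filter_cons_of_pos (by simpa using h)]
      simp only [List.countP_cons, ih]
      by_cases hq : q a = true <;> simp [hq] <;> omega

-- the value kth_largest returns is the m-th largest: fewer than m+1 strictly above it,
-- at least m+1 at-or-above it
theorem pv_kth_spec : ∀ (N : Nat) (vals : List Int), vals.length ≤ N → ∀ (m : Int), 0 ≤ m →
    m < (vals.length : Int) →
    ((vals.countP (fun v => decide (kth_largest vals m < v)) : Int) ≤ m ∧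
      m < (vals.countP (fun v => decide (kth_largest vals m < v)) : Int)
        + (vals.countP (fun v => decide (v = kth_largest vals m)) : Int)) := by
  intro N
  induction N with
  | zero => intro vals hlen m hm0 hmlen; omega
  | succ N ih =>
    intro vals hlen m hm0 hmlen
    have hne : ¬ vals.length = 0 := by omega
    rw [kth_largest]
    rw [dif_neg hne]
    set piv := vals.getD (vals.length / 2) 0 with hpiv
    have hpmem : piv ∈ vals := by
      rw [hpiv, List.getD_eq_getElem _ _ (Nat.div_lt_self (Nat.pos_of_ne_zero hne) (by omega))]
      exact List.getElem_mem _
    set gt := vals.filter (fun v => decide (piv < v)) with hgt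
    set e := vals.countP (fun v => decide (v = piv)) with he
    have hglen : gt.length = vals.countP (fun v => decide (piv < v)) := by
      rw [hgt, List.countP_eq_length_filter]
    have hglt : gt.length < vals.length := pv_filter_lt_of_piv vals hne _ (by rw [hpiv]; simp)
    split_ifs with h1 h2
    · -- recurse into gt
      obtain ⟨hg1, hg2⟩ := ih gt (by omega) m hm0 h1
      set t := kth_largest gt m with ht
      have htmem : t ∈ gt := by
        have hpos : 0 < gt.countP (fun v => decide (v = t)) := by omega
        obtain ⟨a, ha, hat⟩ := List.countP_pos_iff.mp hpos
        rw [show a = t by simpa using hat] at ha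
        exact ha
      have hpt : piv < t := by
        have := (List.mem_filter.mp htmem).2
        simpa using this
      have hcgt : gt.countP (fun v => decide (t < v)) = vals.countP (fun v => decide (t < v)) := by
        rw [hgt, List.countP_filter]
        apply List.countP_congr
        intro a _
        simp only [Bool.and_eq_true, decide_eq_true_eq]
        exact ⟨fun h => h.1, fun h => ⟨h, hpt.trans h⟩⟩
      have hceq : gt.countP (fun v => decide (v = t)) = vals.countP (fun v => decide (v = t)) := by
        rw [hgt, List.countP_filter]
        apply List.countP_congr
        intro a _
        simp only [Bool.and_eq_true, decide_eq_true_eq]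
        exact ⟨fun h => h.1, fun h => ⟨h, h ▸ hpt⟩⟩
      rw [← hcgt, ← hceq]
      exact ⟨hg1, hg2⟩
    · -- t = piv
      constructor
      · rw [← hglen]; omega
      · rw [← hglen, ← he]; omega
    · -- recurse into lt
      set lts := vals.filter (fun v => decide (v < piv)) with hlts
      have hltlen : lts.length < vals.length := pv_filter_lt_of_piv vals hne _ (by rw [hpiv]; simp)
      have htotal : vals.length = gt.length + (vals.filter (fun v => decide (v = piv))).length + lts.length := by
        have := pv_countP_tri piv (fun _ => true) vals
        simpa [List.countP_true] using this
      have heeq : e = (vals.filter (fun v => decide (v = piv))).length := by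
        rw [he, List.countP_eq_length_filter]
      set m' := m - gt.length - e with hm'
      have hm'0 : 0 ≤ m' := by omega
      have hm'lt : m' < (lts.length : Int) := by
        have : (vals.length : Int) = gt.length + e + lts.length := by
          rw [heeq]; exact_mod_cast htotal
        omega
      obtain ⟨hl1, hl2⟩ := ih lts (by omega) m' hm'0 hm'lt
      set t := kth_largest lts m' with ht
      have htmem : t ∈ lts := by
        have hpos : 0 < lts.countP (fun v => decide (v = t)) := by omega
        obtain ⟨a, ha, hat⟩ := List.countP_pos_iff.mp hpos
        rw [show a = t by simpa using hat] at ha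
        exact ha
      have htp : t < piv := by
        have := (List.mem_filter.mp htmem).2
        simpa using this
      have hsplitgt : vals.countP (fun v => decide (t < v))
          = gt.length + (vals.filter (fun v => decide (v = piv))).length
            + lts.countP (fun v => decide (t < v)) := by
        rw [pv_countP_tri piv (fun v => decide (t < v)) vals, ← hgt, ← hlts]
        have e1 : gt.countP (fun v => decide (t < v)) = gt.length := by
          rw [List.countP_eq_length]
          intro a ha
          have := (List.mem_filter.mp ha).2
          simp only [decide_eq_true_eq] at this ⊢
          exact htp.trans this
        have e2 : (vals.filter (fun v => decide (v = piv))).countP (fun v => decide (t < v))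
            = (vals.filter (fun v => decide (v = piv))).length := by
          rw [List.countP_eq_length]
          intro a ha
          have := (List.mem_filter.mp ha).2
          simp only [decide_eq_true_eq] at this ⊢
          omega
        rw [e1, e2]
      have hsplit_eq : vals.countP (fun v => decide (v = t))
          = lts.countP (fun v => decide (v = t)) := by
        rw [pv_countP_tri piv (fun v => decide (v = t)) vals, ← hgt, ← hlts]
        have e1 : gt.countP (fun v => decide (v = t)) = 0 := by
          rw [List.countP_eq_zero]
          intro a ha
          have := (List.mem_filter.mp ha).2
          simp only [decide_eq_true_eq] at this ⊢
          omega
        have e2 : (vals.filter (fun v => decide (v = piv))).countP (fun v => decide (v = t)) = 0 := by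
          rw [List.countP_eq_zero]
          intro a ha
          have := (List.mem_filter.mp ha).2
          simp only [decide_eq_true_eq] at this ⊢
          omega
        rw [e1, e2]
        omega
      rw [hsplitgt, hsplit_eq]
      constructor
      · push_cast
        omega
      · push_cast
        omega

-- the B-side scan with the running ties counter, element-wise
theorem pv_bScan_eq (t base : Int) :
    ∀ (vs : List Int) (ties : Int),
      bScan t base vs ties = (List.range vs.length).map (fun j =>
        if t < vs.getD j 0 then base + 1
        else if vs.getD j 0 = t ∧ ((vs.take j).countP (fun v => decide (v = t)) : Int) < ties then base + 1
        else base) := by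
  intro vs
  induction vs with
  | nil => intro ties; simp [bScan]
  | cons v vs ih =>
    intro ties
    rw [List.length_cons, List.range_succ_eq_map, List.map_cons, List.map_map]
    by_cases h1 : t < v
    · rw [show bScan t base (v :: vs) ties = (base + 1) :: bScan t base vs ties by
        simp [bScan, h1]]
      congr 1
      · simp [h1]
      · rw [ih ties]
        apply List.map_congr_left
        intro j _
        simp only [Function.comp_apply, Nat.succ_eq_add_one, List.getD_cons_succ,
          List.take_succ_cons, List.countP_cons]
        have hvt : ¬ (v = t) := by omega
        simp [hvt]
    · by_cases h2 : v = t ∧ 0 < ties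
      · rw [show bScan t base (v :: vs) ties = (base + 1) :: bScan t base vs (ties - 1) by
          simp [bScan, h1, h2.1, h2.2]]
        congr 1
        · simp [h1, h2.1, h2.2]
        · rw [ih (ties - 1)]
          apply List.map_congr_left
          intro j _
          simp only [Function.comp_apply, Nat.succ_eq_add_one, List.getD_cons_succ,
            List.take_succ_cons, List.countP_cons, h2.1, decide_true, if_true]
          congr 2
          rw [eq_iff_iff]
          constructor <;> intro h <;> omega
      · rw [show bScan t base (v :: vs) ties = base :: bScan t base vs ties by
          by_cases hv : v = t
          · have hnt : ¬ 0 < ties := fun h => h2 ⟨hv, h⟩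
            simp [bScan, h1, hv, hnt]
          · simp [bScan, h1, hv]]
        congr 1
        · by_cases hv : v = t
          · have hnt : ¬ 0 < ties := fun h => h2 ⟨hv, h⟩
            simp [h1, hv, hnt]
          · simp [h1, hv]
        · rw [ih ties]
          apply List.map_congr_left
          intro j _
          simp only [Function.comp_apply, Nat.succ_eq_add_one, List.getD_cons_succ,
            List.take_succ_cons, List.countP_cons]
          by_cases hv : v = t
          · have hnt : ¬ 0 < ties := fun h => h2 ⟨hv, h⟩
            simp only [hv, decide_true, if_true]
            congr 2
            rw [eq_iff_iff]
            constructor <;> intro h <;> omega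
          · simp [hv]

-- counting helpers on List.range
theorem pv_countP_or_disj (l : List Nat) (A B : Nat → Prop) [DecidablePred A] [DecidablePred B]
    (h : ∀ j ∈ l, ¬(A j ∧ B j)) :
    l.countP (fun j => decide (A j ∨ B j))
      = l.countP (fun j => decide (A j)) + l.countP (fun j => decide (B j)) := by
  induction l with
  | nil => simp
  | cons a l ih =>
    simp only [List.countP_cons]
    rw [ih (fun j hj => h j (List.mem_cons_of_mem _ hj))]
    have hna := h a List.mem_cons_self
    by_cases hA : A a <;> by_cases hB : B a <;> simp [hA, hB] <;> first | omega | tauto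

theorem pv_countP_single (n i : Nat) (P : Nat → Prop) [DecidablePred P] (hi : i < n)
    (hPi : P i) (honly : ∀ j, P j → j = i) :
    (List.range n).countP (fun j => decide (P j)) = 1 := by
  rw [List.countP_congr (q := fun j => j == i)
    (fun x _ => by simp only [beq_iff_eq, decide_eq_true_eq]; exact ⟨honly x, fun h => h ▸ hPi⟩)]
  have := List.count_range (a := i) (n := n)
  rw [if_pos hi] at this
  simpa [List.count] using this

theorem pv_countP_range_restrict (q : Nat → Bool) (j n : Nat) (h : j ≤ n) :
    (List.range j).countP q = (List.range n).countP (fun x => q x && decide (x < j)) := by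
  rw [show n = j + (n - j) by omega, List.range_add, List.countP_append]
  have h1 : (List.range j).countP q = (List.range j).countP (fun x => q x && decide (x < j)) :=
    List.countP_congr (fun x hx => by
      have := List.mem_range.mp hx
      simp [this])
  have h2 : ((List.range (n - j)).map (fun x => j + x)).countP (fun x => q x && decide (x < j)) = 0 := by
    rw [List.countP_map, List.countP_eq_zero]
    intro a _
    simp
  rw [h1, List.countP_map] at *
  rw [h1]
  omega

-- the bridge: 'rank < m+1' (A's bonus condition) equals the threshold condition B checks,
-- for any t with countP(>t) ≤ m < countP(≥t)
theorem pv_rank_bridge (s : Nat → Int) (n : Nat) (t m : Int) (i : Nat)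
    (hg : (((List.range n).countP (fun j => decide (t < s j))) : Int) ≤ m)
    (hge : m < (((List.range n).countP (fun j => decide (t < s j))) : Int)
      + (((List.range n).countP (fun j => decide (s j = t))) : Int))
    (hin : i < n) :
    ((((List.range n).countP (fun j => decide (s i < s j ∨ (s j = s i ∧ j < i)))) : Int) < m + 1
      ↔ (t < s i ∨ (s i = t ∧ (((List.range n).countP (fun j => decide (s j = t ∧ j < i))) : Int)
          < m + 1 - ((List.range n).countP (fun j => decide (t < s j)) : Int)))) := by
  have hsplit : (List.range n).countP (fun j => decide (s i < s j ∨ (s j = s i ∧ j < i)))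
      = (List.range n).countP (fun j => decide (s i < s j))
        + (List.range n).countP (fun j => decide (s j = s i ∧ j < i)) :=
    pv_countP_or_disj _ _ _ (fun j _ => by omega)
  rcases lt_trichotomy (s i) t with h | h | h
  · -- s i below the threshold: no bonus on either side
    have hmono1 : (List.range n).countP (fun j => decide (t ≤ s j))
        ≤ (List.range n).countP (fun j => decide (s i < s j)) :=
      List.countP_mono_left (fun x _ hx => by
        simp only [decide_eq_true_eq] at hx ⊢; omega)
    have hsum : (List.range n).countP (fun j => decide (t ≤ s j))
        = (List.range n).countP (fun j => decide (t < s j))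
          + (List.range n).countP (fun j => decide (s j = t)) := by
      rw [List.countP_congr (q := fun j => decide (t < s j ∨ s j = t))
        (fun x _ => by simp only [decide_eq_true_eq]; omega)]
      exact pv_countP_or_disj _ _ _ (fun j _ => by omega)
    constructor
    · intro hlt
      exfalso
      omega
    · intro hr
      rcases hr with h' | ⟨h', _⟩ <;> omega
  · -- s i = t: bonus iff among the first (m+1-g) tied indices
    have hc1 : (List.range n).countP (fun j => decide (s i < s j))
        = (List.range n).countP (fun j => decide (t < s j)) :=
      List.countP_congr (fun x _ => by simp only [decide_eq_true_eq]; omega)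
    have hc2 : (List.range n).countP (fun j => decide (s j = s i ∧ j < i))
        = (List.range n).countP (fun j => decide (s j = t ∧ j < i)) :=
      List.countP_congr (fun x _ => by simp only [decide_eq_true_eq]; constructor <;> intro hh <;> exact ⟨by omega, hh.2⟩)
    rw [hsplit, hc1, hc2]
    constructor
    · intro hlt
      exact Or.inr ⟨h, by push_cast at hlt ⊢; omega⟩
    · intro hr
      rcases hr with h' | ⟨_, h'⟩
      · omega
      · push_cast
        push_cast at h'
        omega
  · -- s i above the threshold: always a bonus
    have hmono : (List.range n).countP (fun j => decide (s i < s j ∨ (s j = s i ∧ j < i)))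
        ≤ (List.range n).countP (fun j => decide (t < s j ∧ j ≠ i)) :=
      List.countP_mono_left (fun x _ hx => by
        simp only [decide_eq_true_eq] at hx ⊢
        rcases hx with h1 | ⟨h1, h2⟩
        · exact ⟨by omega, by rintro rfl; omega⟩
        · exact ⟨by omega, by omega⟩)
    have hsumg : (List.range n).countP (fun j => decide (t < s j))
        = (List.range n).countP (fun j => decide (t < s j ∧ j ≠ i))
          + (List.range n).countP (fun j => decide (t < s j ∧ j = i)) := by
      rw [List.countP_congr (p := fun j => decide (t < s j))
        (q := fun j => decide ((t < s j ∧ j ≠ i) ∨ (t < s j ∧ j = i)))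
        (fun x _ => by simp only [decide_eq_true_eq]; by_cases hxi : x = i <;> simp [hxi])]
      exact pv_countP_or_disj _ _ _ (fun j _ => by tauto)
    have hone : (List.range n).countP (fun j => decide (t < s j ∧ j = i)) = 1 :=
      pv_countP_single n i _ hin ⟨h, rfl⟩ (fun j hj => hj.2)
    constructor
    · intro _
      exact Or.inl h
    · intro _
      omega

-- ===== VERDICT (by name: the statement is the Claim_ definition above) =====
-- the core equality for the interesting case: k > 0, remaining > 0, remainder rem > 0
theorem pv_main (k : Int) (strata_sizes : List Int) (start remaining : Int)
    (hk : 0 < k) (hrem : 0 < remaining) (hrem0 : ¬ PySem.Int.mod remaining k = 0) :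
    (PySem.List.slice
        (PySem.List.sorted (PySem.List.pyRange 0 k) (fun i => PySem.List.pyGetD strata_sizes i 0) true)
        none (some (PySem.Int.mod remaining k))).foldl
      (fun ac i => PySem.List.pySetD ac i (PySem.List.pyGetD ac i 0 + 1))
      ((List.replicate k.toNat start).map (fun a => a + PySem.Int.floordiv remaining k))
    = bScan
        (kth_largest ((PySem.List.pyRange 0 k).map (fun i => PySem.List.pyGetD strata_sizes i 0))
          (PySem.Int.mod remaining k - 1))
        (start + PySem.Int.floordiv remaining k)
        ((PySem.List.pyRange 0 k).map (fun i => PySem.List.pyGetD strata_sizes i 0))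
        (PySem.Int.mod remaining k
          - (((PySem.List.pyRange 0 k).map (fun i => PySem.List.pyGetD strata_sizes i 0)).countP
              (fun v => decide (kth_largest
                ((PySem.List.pyRange 0 k).map (fun i => PySem.List.pyGetD strata_sizes i 0))
                (PySem.Int.mod remaining k - 1) < v)) : Int)) := by
  set key : Int → Int := fun i => PySem.List.pyGetD strata_sizes i 0 with hkeydef
  set s : Nat → Int := fun j => strata_sizes.getD j 0 with hsdef
  have hkey : ∀ (j : Nat), key (j : Int) = s j := fun j => PySem.List.pyGetD_natCast _ j 0
  set n := k.toNat with hn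
  have hkn : k = (n : Int) := by omega
  have hn0 : 0 < n := by omega
  set rem := PySem.Int.mod remaining k with hremdef
  have hrle : 0 ≤ rem := PySem.Int.mod_nonneg remaining hk
  have hrlt : rem < k := PySem.Int.mod_lt remaining hk
  have hrpos : 0 < rem := by omega
  set base0 := PySem.Int.floordiv remaining k with hbase0
  have hpyr : PySem.List.pyRange 0 k = (List.range n).map (Nat.cast : Nat → Int) := by
    rw [hkn]; exact PySem.List.pyRange_zero_natCast n
  set order := PySem.List.sorted (PySem.List.pyRange 0 k) key true with horder
  have hperm : order.Perm (PySem.List.pyRange 0 k) := PySem.List.sorted_perm _ _ _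
  have hopair : order.Pairwise (pvR key) := by
    apply pv_sorted_stable_pairwise
    rw [hpyr]
    exact List.pairwise_map.mpr (by simpa using List.pairwise_lt_range)
  have hond : order.Nodup := by
    rw [List.Perm.nodup_iff hperm, hpyr]
    exact (List.nodup_range).map (fun a b => by omega)
  set vals := (PySem.List.pyRange 0 k).map key with hvals
  have hvals_eq : vals = (List.range n).map s := by
    rw [hvals, hpyr, List.map_map]
    exact List.map_congr_left (fun j _ => hkey j)
  have hvlen : vals.length = n := by rw [hvals_eq, List.length_map, List.length_range]
  set t := kth_largest vals (rem - 1) with ht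
  have hcntmap : ∀ (q : Int → Bool), vals.countP q = (List.range n).countP (fun x => q (s x)) := by
    intro q
    rw [hvals_eq, List.countP_map]
    rfl
  obtain ⟨hks1, hks2⟩ := pv_kth_spec vals.length vals le_rfl (rem - 1) (by omega) (by omega)
  rw [← ht] at hks1 hks2
  have hG : (vals.countP (fun v => decide (t < v)) : Int)
      = ((List.range n).countP (fun x => decide (t < s x)) : Int) := by rw [hcntmap]
  have hE : (vals.countP (fun v => decide (v = t)) : Int)
      = ((List.range n).countP (fun x => decide (s x = t)) : Int) := by rw [hcntmap]
  -- A side: slice is take, then the increment fold becomes a map over range n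
  have hslice : PySem.List.slice order none (some rem) = order.take rem.toNat :=
    PySem.List.slice_to order hrle
  set S := order.take rem.toNat with hS
  have hSnd : S.Nodup := (List.take_sublist _ _).nodup hond
  have hSmem : ∀ i ∈ S, i ∈ order := fun i hi => List.mem_of_mem_take hi
  have hSbound : ∀ i ∈ S, 0 ≤ i ∧ i < (((List.replicate n start).map (fun a => a + base0)).length : Int) := by
    intro i hi
    have : i ∈ PySem.List.pyRange 0 k := hperm.mem_iff.mp (hSmem i hi)
    rw [hpyr] at this
    obtain ⟨j, hj, rfl⟩ := List.mem_map.mp this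
    have := List.mem_range.mp hj
    simp only [List.length_map, List.length_replicate]
    omega
  rw [hslice, pv_foldl_incr S _ hSnd hSbound]
  -- B side
  rw [pv_bScan_eq]
  rw [show ((List.replicate n start).map (fun a => a + base0)).length = n by
    simp [List.length_map, List.length_replicate]]
  rw [hvlen]
  apply List.map_congr_left
  intro j hj
  have hjn : j < n := List.mem_range.mp hj
  -- left element value
  have hgetrep : ((List.replicate n start).map (fun a => a + base0)).getD j 0 = start + base0 := by
    rw [List.map_replicate, List.getD_eq_getElem?_getD, List.getElem?_replicate]
    simp [hjn]
  -- A's bonus condition, via the stable order and the rank count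
  have hjord : ((j : Int)) ∈ order := by
    rw [hperm.mem_iff, hpyr]
    exact List.mem_map.mpr ⟨j, List.mem_range.mpr hjn, rfl⟩
  have hmemS : ((j : Int) ∈ S) ↔
      (List.range n).countP (fun x => decide (s j < s x ∨ (s x = s j ∧ x < j))) < rem.toNat := by
    rw [hS, pv_mem_take_iff key order rem.toNat _ hopair hjord]
    rw [List.Perm.countP_eq _ hperm, hpyr, List.countP_map]
    have : ∀ x : Nat, decide (pvR key (x : Int) (j : Int)) = decide (s j < s x ∨ (s x = s j ∧ x < j)) := by
      intro x
      simp only [decide_eq_decide]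
      unfold pvR
      rw [hkey, hkey]
      constructor <;> intro hh <;> rcases hh with hh | ⟨hh1, hh2⟩
      · exact Or.inl hh
      · exact Or.inr ⟨hh1, by exact_mod_cast hh2⟩
      · exact Or.inl hh
      · exact Or.inr ⟨hh1, by exact_mod_cast hh2⟩
    simp only [Function.comp_def]
    rw [show (fun x : Nat => decide (pvR key ((x : Nat) : Int) ((j : Nat) : Int)))
        = (fun x : Nat => decide (s j < s x ∨ (s x = s j ∧ x < j))) from funext this]
  -- B's running-count of earlier ties, as a count over range n
  have htake : ((vals.take j).countP (fun v => decide (v = t)) : Int)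
      = ((List.range n).countP (fun x => decide (s x = t ∧ x < j)) : Int) := by
    rw [hvals_eq, ← List.map_take, List.take_range, show min j n = j by omega, List.countP_map]
    rw [pv_countP_range_restrict ((fun v => decide (v = t)) ∘ s) j n (by omega)]
    congr 1
    apply List.countP_congr
    intro x _
    simp [Function.comp_def]
  have hbridge := pv_rank_bridge s n t (rem - 1) j (by rw [← hG]; omega)
    (by rw [← hG, ← hE]; omega) hjn
  have hgd : vals.getD j 0 = s j := by
    rw [hvals_eq]; exact PySem.List.getD_map_range s n j 0 hjn
  rw [hgetrep, hgd]
  simp only [hmemS]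
  have hcond : ((List.range n).countP (fun x => decide (s j < s x ∨ (s x = s j ∧ x < j))) < rem.toNat)
      ↔ (t < s j ∨ (s j = t ∧ ((List.range n).countP (fun x => decide (s x = t ∧ x < j)) : Int)
          < (rem - 1) + 1 - ((List.range n).countP (fun x => decide (t < s x)) : Int))) := by
    rw [← hbridge]
    omega
  simp only [hcond]
  by_cases hb1 : t < s j
  · rw [if_pos (Or.inl hb1), if_pos hb1]
  · by_cases hb2 : s j = t ∧ ((vals.take j).countP (fun v => decide (v = t)) : Int)
        < rem - (vals.countP (fun v => decide (t < v)) : Int)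
    · rw [if_pos (Or.inr ⟨hb2.1, by rw [← htake, ← hG]; have := hb2.2; omega⟩),
        if_neg hb1, if_pos hb2]
    · rw [if_neg ?hn2, if_neg hb1, if_neg hb2]
      · omega
      case hn2 =>
        intro hcontra
        rcases hcontra with hcontra | ⟨hc1, hc2⟩
        · exact hb1 hcontra
        · exact hb2 ⟨hc1, by rw [htake, hG]; omega⟩

theorem allocate_across_strata_equal_spec : Claim_equal_allocate_across_strata_equal := by
  intro size k strata_sizes ensure_min1 _hdom _hpre
  unfold Spec_allocate_across_strata_equal allocate_across_strata_equal allocate_across_strata_equal_alt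
  by_cases hk : k ≤ 0
  · simp only [if_pos hk]
  · simp only [if_neg hk]
    have hk' : 0 < k := by omega
    cases hc : (ensure_min1 && decide (size ≥ k)) with
    | true =>
      simp only [if_true]
      by_cases hrem : size - k ≤ 0
      · simp only [if_pos hrem]
      · simp only [if_neg hrem]
        by_cases hrem0 : PySem.Int.mod (size - k) k = 0
        · simp only [hrem0, PySem.List.slice_to _ (le_refl (0 : Int))]
          simp [Int.toNat_zero, List.take_zero, List.foldl_nil, List.map_replicate]
        · simp only [if_neg hrem0]
          exact pv_main k strata_sizes 1 (size - k) hk' (by omega) hrem0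
    | false =>
      simp only [Bool.false_eq_true, if_false]
      by_cases hrem : size ≤ 0
      · simp only [if_pos hrem]
      · simp only [if_neg hrem]
        by_cases hrem0 : PySem.Int.mod size k = 0
        · simp only [hrem0, PySem.List.slice_to _ (le_refl (0 : Int))]
          simp [Int.toNat_zero, List.take_zero, List.foldl_nil, List.map_replicate]
        · simp only [if_neg hrem0]
          exact pv_main k strata_sizes 0 size hk' (by omega) hrem0
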